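-- pv_equiv track=rewrite | github.com/Anis-Perspective-Data/Python-Exercises | ascending order of even numbers descending order of odd numbers.py | asce_desc
-- ===== SOURCE A (Python) =====
-- def asce_desc(list):
-- 	ascen,desc = [],[]
-- 	for each in list:
-- 		if each%2 == 0:
-- 			ascen.append(each)
-- 		else:
-- 			desc.append(each)
-- 	ascen.sort(reverse = False)
-- 	desc.sort(reverse = True)
-- 	ascen.extend(desc)
-- 	return ascen
-- ===== SOURCE B (Python) =====
-- def asce_desc(list):
--     s = sorted(list)
--     evens = [x for x in s if x % 2 == 0]
--     odds = [x for x in s if x % 2 == 1]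
--     odds.reverse()
--     return evens + odds
-- ===== Notes on version B (the rewrite author's own statement) =====
-- stated objective: alternative
-- what changed: One global sort followed by two parity filters (odds reversed), instead of partitioning first and running two separate sorts.
import Mathlib
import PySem

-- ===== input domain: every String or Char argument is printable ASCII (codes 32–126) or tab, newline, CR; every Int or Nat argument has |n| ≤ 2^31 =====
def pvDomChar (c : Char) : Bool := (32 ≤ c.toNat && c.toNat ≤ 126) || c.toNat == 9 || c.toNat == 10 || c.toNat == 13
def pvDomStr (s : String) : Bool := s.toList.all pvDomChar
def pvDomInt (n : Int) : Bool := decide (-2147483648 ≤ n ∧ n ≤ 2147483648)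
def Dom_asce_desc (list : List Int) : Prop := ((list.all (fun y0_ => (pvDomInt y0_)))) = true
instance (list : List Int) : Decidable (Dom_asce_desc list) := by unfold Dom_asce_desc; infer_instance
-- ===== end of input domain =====

-- B: one global sort, then parity filters (odds reversed), replacing A's partition + two sorts; objective: alternative decomposition, same cost.
-- ===== PORT A =====
def asce_desc (list : List Int) : List Int :=
  let p := list.foldl (fun (ad : List Int × List Int) each =>
    if PySem.Int.mod each 2 = 0 then (ad.1 ++ [each], ad.2) else (ad.1, ad.2 ++ [each])) ([], [])
  let ascen := PySem.List.sorted p.1 (fun x => x) false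
  let desc := PySem.List.sorted p.2 (fun x => x) true
  ascen ++ desc

-- ===== PORT B =====
def asce_desc_alt (list : List Int) : List Int :=
  let s := PySem.List.sorted list (fun x => x) false
  let evens := s.filter (fun x => PySem.Int.mod x 2 == 0)
  let odds := s.filter (fun x => PySem.Int.mod x 2 == 1)
  evens ++ odds.reverse

-- ===== PRECONDITION & SPEC =====
def Spec_asce_desc (list : List Int) (out : List Int) : Prop := out = asce_desc_alt list
instance (list : List Int) (out : List Int) : Decidable (Spec_asce_desc list out) := by unfold Spec_asce_desc; infer_instance

-- ===== CLAIM (what is proved, stated in full; the proofs are below) =====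
def Claim_equal_asce_desc : Prop := ∀ (list : List Int), Dom_asce_desc list → Spec_asce_desc list (asce_desc list)

-- ===== LEMMAS AND PROOFS =====

-- A's partition loop computes the two parity filters of the input, in order.
theorem partition_eq (l a b : List Int) :
    l.foldl (fun (ad : List Int × List Int) each =>
      if PySem.Int.mod each 2 = 0 then (ad.1 ++ [each], ad.2) else (ad.1, ad.2 ++ [each])) (a, b)
    = (a ++ l.filter (fun x => PySem.Int.mod x 2 == 0),
       b ++ l.filter (fun x => PySem.Int.mod x 2 == 1)) := by
  induction l generalizing a b with
  | nil => simp
  | cons x l ih =>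
    rcases PySem.Int.mod_two_eq x with h | h <;>
      simp only [List.foldl_cons, List.filter_cons, h] <;> rw [ih] <;> simp

-- sorting then filtering = filtering then sorting (ascending side).
theorem sorted_filter (l : List Int) (p : Int → Bool) :
    PySem.List.sorted (l.filter p) (fun x => x) false
      = (PySem.List.sorted l (fun x => x) false).filter p := by
  refine List.Perm.eq_of_pairwise (le := (· ≤ ·)) (fun a b _ _ hab hba => le_antisymm hab hba)
    (PySem.List.sorted_pairwise _ _)
    ((PySem.List.sorted_pairwise l (fun x => x)).filter _)
    ((PySem.List.sorted_perm _ _ _).trans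
      ((PySem.List.sorted_perm l (fun x => x) false).filter p).symm)

-- descending sort of the filtered odds = reverse of the ascending-filtered odds.
theorem sorted_rev_filter (l : List Int) (p : Int → Bool) :
    PySem.List.sorted (l.filter p) (fun x => x) true
      = ((PySem.List.sorted l (fun x => x) false).filter p).reverse := by
  refine List.Perm.eq_of_pairwise (le := (· ≥ ·)) (fun a b _ _ hab hba => le_antisymm hba hab)
    (PySem.List.sorted_pairwise_rev _ _)
    ((List.pairwise_reverse).2 ((PySem.List.sorted_pairwise l (fun x => x)).filter _))
    ((PySem.List.sorted_perm _ _ _).trans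
      ((((PySem.List.sorted_perm l (fun x => x) false).filter p).symm).trans
        (List.reverse_perm _).symm))

-- ===== VERDICT =====
theorem asce_desc_spec : Claim_equal_asce_desc := by
  intro l _
  unfold Spec_asce_desc asce_desc asce_desc_alt
  rw [show (([], []) : List Int × List Int) = (([] : List Int), ([] : List Int)) from rfl,
      partition_eq]
  simp [sorted_filter, sorted_rev_filter]
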